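-- pv_equiv track=rewrite | github.com/huanghhappy/duty-roster | app.py | calculate_standard_8_person_shifts
-- ===== SOURCE A (Python) =====
-- def calculate_standard_8_person_shifts(residents_data, num_days):
--     r3s = sorted([r for r in residents_data if r['rank'] == 'R3'], key=lambda x: x['name'])
--     r4s = sorted([r for r in residents_data if r['rank'] == 'R4'], key=lambda x: x['name'])
--     r5s = sorted([r for r in residents_data if r['rank'] == 'R5'], key=lambda x: x['name'])
--     r6s = sorted([r for r in residents_data if r['rank'] == 'R6'], key=lambda x: x['name'])
--
--     quotas = {r['name']: 0 for r in residents_data}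
--     line1_pool = r3s + r4s
--     line2_pool = r5s + r6s
--
--     def distribute_shifts(pool, total_slots):
--         if not pool: return
--         n = len(pool)
--         base_shifts = total_slots // n
--         remainder = total_slots % n
--         for i, r in enumerate(pool):
--             extra = 1 if i < remainder else 0
--             quotas[r['name']] = base_shifts + extra
--
--     distribute_shifts(line1_pool, num_days)
--     distribute_shifts(line2_pool, num_days)
--     return quotas
-- ===== SOURCE B (Python) =====
-- def calculate_standard_8_person_shifts(residents_data, num_days):
--     quotas = {r['name']: 0 for r in residents_data}
--
--     # one pass to bucket residents by rank, instead of four filter scans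
--     pools = {}
--     for r in residents_data:
--         pools.setdefault(r['rank'], []).append(r)
--
--     def by_name(x):
--         return x['name']
--
--     def distribute(pool):
--         n = len(pool)
--         if n == 0:
--             return
--         # round-robin the slots instead of closed-form divmod
--         counts = [0] * n
--         for slot in range(num_days):
--             counts[slot % n] += 1
--         for i, r in enumerate(pool):
--             quotas[r['name']] = counts[i]
--
--     distribute(sorted(pools.get('R3', []), key=by_name) + sorted(pools.get('R4', []), key=by_name))
--     distribute(sorted(pools.get('R5', []), key=by_name) + sorted(pools.get('R6', []), key=by_name))
--     return quotas
-- ===== Notes on version B (the rewrite author's own statement) =====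
-- stated objective: alternative
-- what changed: B buckets residents by rank in one pass (setdefault/append) instead of four filter scans, and replaces the closed-form divmod quota with an explicit round-robin loop that counts slots per pool position.
-- outside the precondition, e.g. on calculate_standard_8_person_shifts([{'name': 'a', 'rank': 'R3'}], -1): A returns {'a': -1}, B returns {'a': 0}
import Mathlib
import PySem

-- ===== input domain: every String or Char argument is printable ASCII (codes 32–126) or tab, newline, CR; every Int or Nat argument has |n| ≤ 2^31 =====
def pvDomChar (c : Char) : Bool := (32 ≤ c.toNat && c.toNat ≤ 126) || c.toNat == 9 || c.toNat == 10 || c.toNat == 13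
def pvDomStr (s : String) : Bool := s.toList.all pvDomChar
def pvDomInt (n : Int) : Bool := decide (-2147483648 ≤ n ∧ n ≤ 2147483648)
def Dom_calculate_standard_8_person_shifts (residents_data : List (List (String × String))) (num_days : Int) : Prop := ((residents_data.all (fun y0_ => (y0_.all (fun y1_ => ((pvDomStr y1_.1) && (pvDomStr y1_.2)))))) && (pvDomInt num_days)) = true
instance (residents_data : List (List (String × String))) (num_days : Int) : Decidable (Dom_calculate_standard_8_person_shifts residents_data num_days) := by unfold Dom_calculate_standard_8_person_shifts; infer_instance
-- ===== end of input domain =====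

-- B buckets residents by rank in one pass and replaces the closed-form divmod quota
-- with an explicit round-robin count of the slots (objective: alternative algorithm).

-- ===== PORT A =====
-- r['name'] / r['rank'] (present under Pre_)
def pvName (r : List (String × String)) : String := PySem.Dict.getD (PySem.Dict.mk r) "name" ""
def pvRank (r : List (String × String)) : String := PySem.Dict.getD (PySem.Dict.mk r) "rank" ""

-- A's inner def distribute_shifts(pool, total_slots): divmod closed form
def pvDistributeA (total : Int) (pool : List (List (String × String)))
    (quotas : PySem.Dict String Int) : PySem.Dict String Int :=
  if pool = [] then quotas else
    let n : Int := pool.length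
    let base := PySem.Int.floordiv total n
    let rem := PySem.Int.mod total n
    (PySem.List.enumerate pool 0).foldl
      (fun q ir => q.insert (pvName ir.2) (base + (if ir.1 < rem then 1 else 0))) quotas

def calculate_standard_8_person_shifts (residents_data : List (List (String × String))) (num_days : Int) : List (String × Int) :=
  let r3s := PySem.List.sorted (residents_data.filter (fun r => pvRank r == "R3")) pvName
  let r4s := PySem.List.sorted (residents_data.filter (fun r => pvRank r == "R4")) pvName
  let r5s := PySem.List.sorted (residents_data.filter (fun r => pvRank r == "R5")) pvName
  let r6s := PySem.List.sorted (residents_data.filter (fun r => pvRank r == "R6")) pvName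
  let quotas := residents_data.foldl (fun d r => d.insert (pvName r) 0) PySem.Dict.empty
  let q1 := pvDistributeA num_days (r3s ++ r4s) quotas
  let q2 := pvDistributeA num_days (r5s ++ r6s) q1
  q2.items

-- ===== PORT B =====
-- Source B: counts = [0]*n; for slot in range(num_days): counts[slot % n] += 1
def pvCountsB (total : Int) (n : Nat) : List Int :=
  (PySem.List.pyRange 0 total 1).foldl
    (fun cs slot =>
      PySem.List.pySetD cs (PySem.Int.mod slot (n : Int))
        (PySem.List.pyGetD cs (PySem.Int.mod slot (n : Int)) 0 + 1))
    (List.replicate n (0 : Int))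

-- Source B's def distribute(pool): round-robin counting, then assignment by position
def pvDistributeB (total : Int) (pool : List (List (String × String)))
    (quotas : PySem.Dict String Int) : PySem.Dict String Int :=
  let n := pool.length
  if n = 0 then quotas else
    let counts := pvCountsB total n
    (PySem.List.enumerate pool 0).foldl
      (fun q ir => q.insert (pvName ir.2) (PySem.List.pyGetD counts ir.1 0)) quotas

def calculate_standard_8_person_shifts_alt (residents_data : List (List (String × String))) (num_days : Int) : List (String × Int) :=
  let quotas := residents_data.foldl (fun d r => d.insert (pvName r) 0) PySem.Dict.empty
  let pools := residents_data.foldl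
    (fun d r => d.modify (pvRank r) [] (fun l => l ++ [r]))
    (PySem.Dict.empty : PySem.Dict String (List (List (String × String))))
  let line1 := PySem.List.sorted (pools.getD "R3" []) pvName
            ++ PySem.List.sorted (pools.getD "R4" []) pvName
  let line2 := PySem.List.sorted (pools.getD "R5" []) pvName
            ++ PySem.List.sorted (pools.getD "R6" []) pvName
  let q1 := pvDistributeB num_days line1 quotas
  let q2 := pvDistributeB num_days line2 q1
  q2.items

-- ===== PRECONDITION & SPEC =====
-- Pre_ excludes residents missing the 'name' or 'rank' key, on which A raises KeyError,
-- and restricts num_days to the natural domain 0 ≤ num_days when some resident has a pool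
-- rank R3–R6 (there, on a negative day count, A returns floor-division artefacts such as
-- negative quotas, while B assigns no slot); with no pool-ranked resident the two agree
-- for every num_days, so nothing is excluded.
def Pre_calculate_standard_8_person_shifts (residents_data : List (List (String × String))) (num_days : Int) : Prop :=
  (∀ r ∈ residents_data,
    (PySem.Dict.mk r).contains "name" = true ∧ (PySem.Dict.mk r).contains "rank" = true) ∧
  (0 ≤ num_days ∨
    residents_data.all (fun r =>
      !(pvRank r == "R3" || pvRank r == "R4" || pvRank r == "R5" || pvRank r == "R6")) = true)
instance (residents_data : List (List (String × String))) (num_days : Int) : Decidable (Pre_calculate_standard_8_person_shifts residents_data num_days) := by unfold Pre_calculate_standard_8_person_shifts; infer_instance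

def pvWitness_calculate_standard_8_person_shifts : (List (List (String × String))) × Int :=
  ([[("name", "amy"), ("rank", "R3")], [("name", "bob"), ("rank", "R5")]], 7)

def Spec_calculate_standard_8_person_shifts (residents_data : List (List (String × String))) (num_days : Int) (out : List (String × Int)) : Prop := out = calculate_standard_8_person_shifts_alt residents_data num_days
instance (residents_data : List (List (String × String))) (num_days : Int) (out : List (String × Int)) : Decidable (Spec_calculate_standard_8_person_shifts residents_data num_days out) := by unfold Spec_calculate_standard_8_person_shifts; infer_instance

-- ===== CLAIM (what is proved, stated in full; the proofs are below) =====
def Claim_equal_calculate_standard_8_person_shifts : Prop := ∀ (residents_data : List (List (String × String))) (num_days : Int), Dom_calculate_standard_8_person_shifts residents_data num_days → Pre_calculate_standard_8_person_shifts residents_data num_days → Spec_calculate_standard_8_person_shifts residents_data num_days (calculate_standard_8_person_shifts residents_data num_days)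

-- ===== LEMMAS AND PROOFS =====

-- the one-pass rank bucketing collects exactly the filter of each rank, in order
theorem pv_bucket_spec (xs : List (List (String × String)))
    (d : PySem.Dict String (List (List (String × String)))) (k : String) :
    (xs.foldl (fun d r => d.modify (pvRank r) [] (fun l => l ++ [r])) d).getD k []
      = d.getD k [] ++ xs.filter (fun r => pvRank r == k) := by
  induction xs generalizing d with
  | nil => simp
  | cons r xs ih =>
    simp only [List.foldl_cons, List.filter_cons]
    rw [ih, PySem.Dict.getD_modify]
    by_cases h : k = pvRank r
    · simp [h, List.append_assoc]
    · have h' : (pvRank r == k) = false := by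
        simp; exact fun hh => h hh.symm
      simp [h, h']

-- round-robin counting reproduces base + (1 if i < remainder else 0)
theorem pv_counts_spec (n t : Nat) (hn : 0 < n) :
    (pvCountsB (t : Int) n).length = n ∧
    ∀ i : Nat, i < n →
      PySem.List.pyGetD (pvCountsB (t : Int) n) (i : Int) 0
        = ((t / n + (if i < t % n then 1 else 0) : Nat) : Int) := by
  induction t with
  | zero =>
    constructor
    · simp [pvCountsB, PySem.List.pyRange_one_eq_nil]
    · intro i hi
      simp [pvCountsB, PySem.List.pyRange_one_eq_nil, PySem.List.pyGetD_natCast,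
        List.getD_eq_getElem?_getD, hi]
  | succ t ih =>
    have hstep : pvCountsB ((t + 1 : Nat) : Int) n
        = PySem.List.pySetD (pvCountsB (t : Int) n) (PySem.Int.mod (t : Int) (n : Int))
            (PySem.List.pyGetD (pvCountsB (t : Int) n) (PySem.Int.mod (t : Int) (n : Int)) 0 + 1) := by
      have hc : ((t + 1 : Nat) : Int) = (t : Int) + 1 := by push_cast; ring
      rw [pvCountsB, hc, PySem.List.pyRange_one_succ_right (by positivity), List.foldl_append]
      rfl
    have hmod : PySem.Int.mod (t : Int) (n : Int) = ((t % n : Nat) : Int) :=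
      PySem.Int.mod_natCast t n
    have hlt : t % n < (pvCountsB (t : Int) n).length := by rw [ih.1]; exact Nat.mod_lt _ hn
    constructor
    · rw [hstep, PySem.List.length_pySetD, ih.1]
    · intro i hi
      rw [hstep, hmod, PySem.List.pyGetD_pySetD_natCast _ _ _ _ _ hlt]
      rw [ih.2 i hi, ih.2 (t % n) (Nat.mod_lt _ hn)]
      have harith : t / n + (if i < t % n then 1 else 0) + (if i = t % n then 1 else 0)
          = (t + 1) / n + (if i < (t + 1) % n then 1 else 0) := by
        have ht : n * (t / n) + t % n = t := Nat.div_add_mod t n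
        have hb : t % n < n := Nat.mod_lt _ hn
        have e1 : t + 1 = (t % n + 1) + (t / n) * n := by
          conv_lhs => rw [← ht]
          ring
        have e2 : (t + 1) / n = (t % n + 1) / n + t / n := by
          rw [e1, Nat.add_mul_div_right _ _ hn]
        have e3 : (t + 1) % n = (t % n + 1) % n := by
          rw [e1, Nat.add_mul_mod_self_right]
        rcases Nat.lt_or_ge (t % n + 1) n with hc | hc
        · rw [e2, e3, Nat.div_eq_of_lt hc, Nat.mod_eq_of_lt hc]
          split_ifs <;> omega
        · have hc' : t % n + 1 = n := by omega
          rw [e2, e3, hc', Nat.div_self hn, Nat.mod_self]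
          split_ifs <;> omega
      split_ifs at harith ⊢ <;> first
        | (exfalso; omega)
        | exact_mod_cast harith

-- the two distribute helpers agree for a non-negative total
theorem pv_distribute_eq (total : Int) (ht : 0 ≤ total)
    (pool : List (List (String × String))) (q : PySem.Dict String Int) :
    pvDistributeB total pool q = pvDistributeA total pool q := by
  by_cases hp : pool = []
  · simp [pvDistributeA, pvDistributeB, hp]
  · have hn : 0 < pool.length := List.length_pos_iff.mpr hp
    have hlen : pool.length ≠ 0 := Nat.pos_iff_ne_zero.mp hn
    set t := total.toNat with htdef
    have htc : total = (t : Int) := (Int.toNat_of_nonneg ht).symm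
    simp only [pvDistributeA, pvDistributeB, hp, hlen, if_false]
    apply PySem.List.foldl_congr_mem
    intro acc ir hmem
    obtain ⟨k, hk, hir⟩ := (PySem.List.mem_enumerate_iff pool 0 ir).mp hmem
    subst hir
    simp only [zero_add]
    congr 1
    rw [htc, PySem.Int.floordiv_natCast, PySem.Int.mod_natCast,
      (pv_counts_spec pool.length t hn).2 k hk]
    split_ifs with h1 h2 h2 <;> push_cast at h1 h2 ⊢ <;> omega

-- ===== VERDICT (by name: the statement is the Claim_ definition above) =====
theorem calculate_standard_8_person_shifts_spec : Claim_equal_calculate_standard_8_person_shifts := by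
  intro residents_data num_days _ hpre
  unfold Spec_calculate_standard_8_person_shifts
  rcases hpre.2 with ht | hall
  · simp only [calculate_standard_8_person_shifts, calculate_standard_8_person_shifts_alt,
      pv_bucket_spec, PySem.Dict.getD_empty, List.nil_append,
      pv_distribute_eq num_days ht]
  · have hfil : ∀ s : String, s ∈ (["R3", "R4", "R5", "R6"] : List String) →
        residents_data.filter (fun r => pvRank r == s) = [] := by
      intro s hs
      rw [List.filter_eq_nil_iff]
      intro a ha
      have h' := List.all_eq_true.mp hall a ha
      simp only [Bool.not_eq_true', Bool.or_eq_false_iff, beq_eq_false_iff_ne] at h'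
      obtain ⟨⟨⟨h3, h4⟩, h5⟩, h6⟩ := h'
      fin_cases hs <;> simp [h3, h4, h5, h6]
    have hs0 : PySem.List.sorted ([] : List (List (String × String))) pvName = [] :=
      by decide
    simp only [calculate_standard_8_person_shifts, calculate_standard_8_person_shifts_alt,
      pv_bucket_spec, PySem.Dict.getD_empty, List.nil_append,
      hfil "R3" (by simp), hfil "R4" (by simp), hfil "R5" (by simp), hfil "R6" (by simp),
      hs0, pvDistributeA, pvDistributeB]
    simp
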